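-- pv_equiv track=rewrite | github.com/dliberat/algo-practice | problems/chapter06.py | contiguous_sum_6_1
-- ===== SOURCE A (Python) =====
-- def contiguous_sum_6_1(inputs):
--     if not inputs:
--         return []
--
--     start_locs = list(range(len(inputs)))
--     sums = inputs[:]
--
--     for i, val in enumerate(inputs):
--         if i == 0:
--             continue
--
--         x = sums[i-1] + val
--         if x > val:
--             sums[i] = x
--             start_locs[i] = start_locs[i-1]
--
--     largest = sums[0]
--     largest_index = 0
--
--     for i, s in enumerate(sums):
--         if s > largest:
--             largest = s
--             largest_index = i
--
--     return inputs[start_locs[largest_index]:largest_index+1]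
-- ===== SOURCE B (Python) =====
-- def contiguous_sum_6_1(inputs):
--     if not inputs:
--         return []
--     cur = best = inputs[0]
--     cur_start = best_start = best_end = 0
--     for i in range(1, len(inputs)):
--         val = inputs[i]
--         if cur + val > val:
--             cur = cur + val
--         else:
--             cur = val
--             cur_start = i
--         if cur > best:
--             best = cur
--             best_start = cur_start
--             best_end = i
--     return inputs[best_start:best_end + 1]
-- ===== Notes on version B (the rewrite author's own statement) =====
-- stated objective: simpler
-- what changed: Replaced the two-table (sums/start_locs) dynamic-programming pass plus a separate max-finding scan with a single-pass Kadane loop carrying five scalars (cur, cur_start, best, best_start, best_end), eliminating both auxiliary lists and the second loop.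
import Mathlib
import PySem

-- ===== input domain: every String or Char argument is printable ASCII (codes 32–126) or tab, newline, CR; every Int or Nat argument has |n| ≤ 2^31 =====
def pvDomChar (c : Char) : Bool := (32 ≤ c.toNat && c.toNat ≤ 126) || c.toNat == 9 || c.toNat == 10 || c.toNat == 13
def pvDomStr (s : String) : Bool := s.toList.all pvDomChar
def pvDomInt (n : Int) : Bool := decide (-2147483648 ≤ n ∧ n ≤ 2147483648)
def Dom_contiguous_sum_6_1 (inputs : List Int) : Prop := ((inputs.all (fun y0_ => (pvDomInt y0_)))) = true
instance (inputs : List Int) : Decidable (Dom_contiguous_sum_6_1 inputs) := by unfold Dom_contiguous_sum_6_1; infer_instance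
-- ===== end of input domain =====

-- B replaces A's two DP tables (sums/start_locs) and separate max-scan with a single-pass
-- Kadane loop over five scalars; same return value, O(1) extra space (objective: simpler).

-- ===== PORT A =====
-- all pyGetD/pySetD indices are provably in range (i runs over enumerate of the list), so the
-- defaulted forms are exact here
def contiguous_sum_6_1 (inputs : List Int) : List Int :=
  if inputs = [] then []
  else
    let n : Int := inputs.length
    let start_locs0 := PySem.List.pyRange 0 n 1
    let sums0 := inputs          -- inputs[:] (a copy; A never mutates its argument)
    let tabs :=
      (PySem.List.enumerate inputs).foldl
        (fun (st : List Int × List Int) iv =>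
          if iv.1 == 0 then st
          else
            let x := PySem.List.pyGetD st.1 (iv.1 - 1) 0 + iv.2
            if x > iv.2 then
              (PySem.List.pySetD st.1 iv.1 x,
               PySem.List.pySetD st.2 iv.1 (PySem.List.pyGetD st.2 (iv.1 - 1) 0))
            else st)
        (sums0, start_locs0)
    let best :=
      (PySem.List.enumerate tabs.1).foldl
        (fun (st : Int × Int) is => if is.2 > st.1 then (is.2, is.1) else st)
        (PySem.List.pyGetD tabs.1 0 0, 0)
    PySem.List.slice inputs (some (PySem.List.pyGetD tabs.2 best.2 0)) (some (best.2 + 1))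

-- ===== PORT B =====
def contiguous_sum_6_1_alt (inputs : List Int) : List Int :=
  match inputs with
  | [] => []
  | x :: _ =>
    let st :=
      (PySem.List.pyRange 1 inputs.length 1).foldl
        (fun (st : Int × Int × Int × Int × Int) i =>
          let val := PySem.List.pyGetD inputs i 0
          let cur := if st.1 + val > val then st.1 + val else val
          let cur_start := if st.1 + val > val then st.2.1 else i
          if cur > st.2.2.1 then (cur, cur_start, cur, cur_start, i)
          else (cur, cur_start, st.2.2.1, st.2.2.2.1, st.2.2.2.2))
        (x, 0, x, 0, 0)
    PySem.List.slice inputs (some st.2.2.2.1) (some (st.2.2.2.2 + 1))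

-- ===== PRECONDITION & SPEC =====
def Spec_contiguous_sum_6_1 (inputs : List Int) (out : List Int) : Prop := out = contiguous_sum_6_1_alt inputs
instance (inputs : List Int) (out : List Int) : Decidable (Spec_contiguous_sum_6_1 inputs out) := by unfold Spec_contiguous_sum_6_1; infer_instance

-- ===== CLAIM (what is proved, stated in full; the proofs are below) =====
def Claim_equal_contiguous_sum_6_1 : Prop := ∀ (inputs : List Int), Dom_contiguous_sum_6_1 inputs → Spec_contiguous_sum_6_1 inputs (contiguous_sum_6_1 inputs)

-- ===== LEMMAS AND PROOFS =====

-- running best-ending-here sum (A's sums[k], B's cur)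
def sV (inputs : List Int) : ℕ → Int
  | 0 => inputs.getD 0 0
  | k + 1 =>
    let v := inputs.getD (k + 1) 0
    if sV inputs k + v > v then sV inputs k + v else v

-- start index of that run (A's start_locs[k], B's cur_start)
def tV (inputs : List Int) : ℕ → Int
  | 0 => 0
  | k + 1 =>
    let v := inputs.getD (k + 1) 0
    if sV inputs k + v > v then tV inputs k else ((k : Int) + 1)

-- best-so-far value and its (first) index
def bV (inputs : List Int) : ℕ → Int × ℕ
  | 0 => (sV inputs 0, 0)
  | k + 1 =>
    let p := bV inputs k
    if sV inputs (k + 1) > p.1 then (sV inputs (k + 1), k + 1) else p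

-- A's tables after the first loop has processed indices 1..k
def tabsAt (inputs : List Int) (k : ℕ) : List Int × List Int :=
  ((List.range (k + 1)).map (sV inputs) ++ inputs.drop (k + 1),
   (List.range (k + 1)).map (tV inputs) ++ PySem.List.pyRange ((k : Int) + 1) inputs.length 1)

-- B's state after processing indices 1..k
def psiAt (inputs : List Int) (k : ℕ) : Int × Int × Int × Int × Int :=
  (sV inputs k, tV inputs k, (bV inputs k).1, tV inputs (bV inputs k).2, ((bV inputs k).2 : Int))

theorem getD_map_range_append {f : ℕ → Int} {rest : List Int} {m j : ℕ} (h : j < m) :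
    ((List.range m).map f ++ rest).getD j 0 = f j := by
  rw [List.getD_eq_getElem?_getD, List.getElem?_append_left (by simpa using h)]
  simp [h]

theorem set_map_range_append {f : ℕ → Int} {rest : List Int} {m : ℕ} {y : Int} :
    ((List.range m).map f ++ rest).set m y = (List.range m).map f ++ rest.set 0 y := by
  rw [List.set_append_right _ _ (by simp)]
  simp

theorem stepA_eq (inputs : List Int) (k : ℕ) (hk : k + 1 < inputs.length) :
    (if ((k + 1 : ℕ) : Int) == 0 then tabsAt inputs k
     else
       let x := PySem.List.pyGetD (tabsAt inputs k).1 (((k + 1 : ℕ) : Int) - 1) 0 + inputs[k+1]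
       if x > inputs[k+1] then
         (PySem.List.pySetD (tabsAt inputs k).1 ((k + 1 : ℕ) : Int) x,
          PySem.List.pySetD (tabsAt inputs k).2 ((k + 1 : ℕ) : Int)
            (PySem.List.pyGetD (tabsAt inputs k).2 (((k + 1 : ℕ) : Int) - 1) 0))
       else tabsAt inputs k)
    = tabsAt inputs (k + 1) := by
  have hkk : k < inputs.length := by omega
  have hcast : ((k : Int) + 1) = (((k + 1 : ℕ)) : Int) := by push_cast; ring
  have hne : ((((k + 1 : ℕ) : Int)) == 0) = false := by simp; omega
  have hm1 : (((k + 1 : ℕ) : Int)) - 1 = ((k : ℕ) : Int) := by push_cast; ring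
  have hget1 : PySem.List.pyGetD (tabsAt inputs k).1 ((((k + 1 : ℕ) : Int)) - 1) 0 = sV inputs k := by
    rw [hm1, PySem.List.pyGetD_natCast]
    exact getD_map_range_append (Nat.lt_succ_self k)
  have hget2 : PySem.List.pyGetD (tabsAt inputs k).2 ((((k + 1 : ℕ) : Int)) - 1) 0 = tV inputs k := by
    rw [hm1, PySem.List.pyGetD_natCast]
    exact getD_map_range_append (Nat.lt_succ_self k)
  have hdrop : inputs.drop (k + 1) = inputs[k+1] :: inputs.drop (k + 2) := by
    simpa using List.drop_eq_getElem_cons hk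
  have hrange : PySem.List.pyRange ((k : Int) + 1) inputs.length 1
      = ((k : Int) + 1) :: PySem.List.pyRange ((k : Int) + 1 + 1) inputs.length 1 := by
    exact PySem.List.pyRange_one_cons (by exact_mod_cast hk)
  have hgetV : inputs.getD (k + 1) 0 = inputs[k+1] := List.getD_eq_getElem inputs 0 hk
  simp only [hne, Bool.false_eq_true, if_false, hget1, hget2,
    PySem.List.pySetD_natCast]
  have hlen1 : ((List.range (k + 1)).map (sV inputs)).length = k + 1 := by simp
  have hlen2 : ((List.range (k + 1)).map (tV inputs)).length = k + 1 := by simp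
  have hsV : sV inputs (k + 1)
      = if sV inputs k + inputs[k+1] > inputs[k+1] then sV inputs k + inputs[k+1]
        else inputs[k+1] := by
    rw [sV]; simp only [hgetV]
  have htV : tV inputs (k + 1)
      = if sV inputs k + inputs[k+1] > inputs[k+1] then tV inputs k else ((k : Int) + 1) := by
    rw [tV]; simp only [hgetV]
  have hr2 : (List.range (k + 2)).map (tV inputs)
      = (List.range (k + 1)).map (tV inputs) ++ [tV inputs (k + 1)] := by
    rw [List.range_succ]; simp
  have hr1 : (List.range (k + 2)).map (sV inputs)
      = (List.range (k + 1)).map (sV inputs) ++ [sV inputs (k + 1)] := by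
    rw [List.range_succ]; simp
  by_cases hc : sV inputs k + inputs[k+1] > inputs[k+1]
  · simp only [hc, if_pos]
    unfold tabsAt
    refine Prod.ext ?_ ?_
    · show ((List.range (k+1)).map (sV inputs) ++ inputs.drop (k+1)).set (k+1)
          (sV inputs k + inputs[k+1]) = _
      rw [set_map_range_append, hdrop]
      simp only [List.set_cons_zero, hr1, hsV, if_pos hc, List.append_assoc,
        List.singleton_append]
    · show ((List.range (k+1)).map (tV inputs) ++ _).set (k+1) (tV inputs k) = _
      rw [set_map_range_append, hrange]
      simp only [List.set_cons_zero, hr2, htV, if_pos hc, List.append_assoc,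
        List.singleton_append]
      norm_cast
  · simp only [hc, if_false]
    unfold tabsAt
    refine Prod.ext ?_ ?_
    · show (List.range (k+1)).map (sV inputs) ++ inputs.drop (k+1) = _
      rw [hdrop, hr1, hsV, if_neg hc]
      simp
    · show (List.range (k+1)).map (tV inputs) ++ _ = _
      rw [hrange, hr2, htV, if_neg hc]
      simp only [List.append_assoc, List.singleton_append]
      norm_cast


-- the first loop, from index s on (suffix ys of inputs), finishes the tables
theorem loopA (inputs : List Int) (ys : List Int) (s : ℕ) (hs : 1 ≤ s)
    (hsn : s ≤ inputs.length) (hys : ys = inputs.drop s) :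
    (PySem.List.enumerate ys (s : Int)).foldl
      (fun (st : List Int × List Int) iv =>
        if iv.1 == 0 then st
        else
          let x := PySem.List.pyGetD st.1 (iv.1 - 1) 0 + iv.2
          if x > iv.2 then
            (PySem.List.pySetD st.1 iv.1 x,
             PySem.List.pySetD st.2 iv.1 (PySem.List.pyGetD st.2 (iv.1 - 1) 0))
          else st)
      (tabsAt inputs (s - 1))
    = tabsAt inputs (inputs.length - 1) := by
  induction ys generalizing s with
  | nil =>
    have : s = inputs.length := by
      have := congrArg List.length hys
      simp at this
      omega
    subst this
    simp [PySem.List.enumerate_nil]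
  | cons v ys' ih =>
    have hlt : s < inputs.length := by
      by_contra h
      rw [List.drop_eq_nil_of_le (by omega)] at hys
      simp at hys
    obtain ⟨k, rfl⟩ : ∃ k, s = k + 1 := ⟨s - 1, by omega⟩
    rw [List.drop_eq_getElem_cons hlt] at hys
    obtain ⟨hv, hys'⟩ := List.cons.injEq .. ▸ hys
    rw [PySem.List.enumerate_cons, List.foldl_cons]
    simp only [Nat.add_sub_cancel]
    rw [show ((k + 1 : ℕ) : Int) + 1 = ((k + 2 : ℕ) : Int) by push_cast; ring]
    subst hv
    rw [stepA_eq inputs k hlt]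
    have := ih (k + 2) (by omega) (by omega) (by simpa using hys')
    simpa using this

-- the max scan over the finished sums table computes bV
theorem loopMax (inputs : List Int) (n : ℕ) (hn : n = inputs.length) (ys : List Int) (s : ℕ)
    (hs : 1 ≤ s) (hsn : s ≤ n) (hys : ys = ((List.range n).map (sV inputs)).drop s) :
    (PySem.List.enumerate ys (s : Int)).foldl
      (fun (st : Int × Int) is => if is.2 > st.1 then (is.2, is.1) else st)
      ((bV inputs (s - 1)).1, ((bV inputs (s - 1)).2 : Int))
    = ((bV inputs (n - 1)).1, ((bV inputs (n - 1)).2 : Int)) := by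
  induction ys generalizing s with
  | nil =>
    have : s = n := by
      have := congrArg List.length hys
      simp at this
      omega
    subst this
    simp [PySem.List.enumerate_nil]
  | cons v ys' ih =>
    have hlt : s < n := by
      by_contra h
      rw [List.drop_eq_nil_of_le (by simp; omega)] at hys
      simp at hys
    obtain ⟨k, rfl⟩ : ∃ k, s = k + 1 := ⟨s - 1, by omega⟩
    have hsl : k + 1 < ((List.range n).map (sV inputs)).length := by simp; omega
    rw [List.drop_eq_getElem_cons hsl] at hys
    obtain ⟨hv, hys'⟩ := List.cons.injEq .. ▸ hys
    have hv' : v = sV inputs (k + 1) := by simpa using hv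
    rw [PySem.List.enumerate_cons, List.foldl_cons]
    simp only [Nat.add_sub_cancel]
    have hstep : (if v > (bV inputs k).1 then (v, ((k + 1 : ℕ) : Int))
        else ((bV inputs k).1, ((bV inputs k).2 : Int)))
        = ((bV inputs (k + 1)).1, ((bV inputs (k + 1)).2 : Int)) := by
      rw [hv']
      by_cases hc : sV inputs (k + 1) > (bV inputs k).1
      · rw [if_pos hc]
        rw [show bV inputs (k + 1) = if sV inputs (k+1) > (bV inputs k).1
              then (sV inputs (k+1), k+1) else bV inputs k from rfl, if_pos hc]
      · rw [if_neg hc]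
        rw [show bV inputs (k + 1) = if sV inputs (k+1) > (bV inputs k).1
              then (sV inputs (k+1), k+1) else bV inputs k from rfl, if_neg hc]
    rw [show ((k + 1 : ℕ) : Int) + 1 = ((k + 2 : ℕ) : Int) by push_cast; ring]
    have := ih (k + 2) (by omega) (by omega) (by simpa using hys')
    simp only at this ⊢
    rw [← this]
    congr 1

-- B's loop from index s on reaches the final state
theorem loopB (inputs : List Int) (m s : ℕ) (hs : 1 ≤ s) (hm : s + m = inputs.length) :
    (PySem.List.pyRange (s : Int) inputs.length 1).foldl
      (fun (st : Int × Int × Int × Int × Int) i =>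
        let val := PySem.List.pyGetD inputs i 0
        let cur := if st.1 + val > val then st.1 + val else val
        let cur_start := if st.1 + val > val then st.2.1 else i
        if cur > st.2.2.1 then (cur, cur_start, cur, cur_start, i)
        else (cur, cur_start, st.2.2.1, st.2.2.2.1, st.2.2.2.2))
      (psiAt inputs (s - 1))
    = psiAt inputs (inputs.length - 1) := by
  induction m generalizing s with
  | zero =>
    have : s = inputs.length := by omega
    subst this
    rw [PySem.List.pyRange_one_eq_nil (by omega)]
    simp
  | succ m ih =>
    have hlt : s < inputs.length := by omega
    rw [PySem.List.pyRange_one_cons (by exact_mod_cast hlt), List.foldl_cons]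
    obtain ⟨k, rfl⟩ : ∃ k, s = k + 1 := ⟨s - 1, by omega⟩
    simp only [Nat.add_sub_cancel]
    have hval : PySem.List.pyGetD inputs ((k + 1 : ℕ) : Int) 0 = inputs[k + 1] := by
      rw [PySem.List.pyGetD_natCast]
      exact List.getD_eq_getElem inputs 0 hlt
    have hstep : (let val := PySem.List.pyGetD inputs ((k + 1 : ℕ) : Int) 0
        let cur := if (psiAt inputs k).1 + val > val then (psiAt inputs k).1 + val else val
        let cur_start := if (psiAt inputs k).1 + val > val then (psiAt inputs k).2.1
          else ((k + 1 : ℕ) : Int)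
        if cur > (psiAt inputs k).2.2.1 then (cur, cur_start, cur, cur_start, ((k + 1 : ℕ) : Int))
        else (cur, cur_start, (psiAt inputs k).2.2.1, (psiAt inputs k).2.2.2.1,
          (psiAt inputs k).2.2.2.2))
        = psiAt inputs (k + 1) := by
      simp only [hval, psiAt]
      have hsVe : sV inputs (k + 1)
          = if sV inputs k + inputs[k+1] > inputs[k+1] then sV inputs k + inputs[k+1]
            else inputs[k+1] := by
        rw [sV]; simp only [List.getD_eq_getElem inputs 0 hlt]
      have htVe : tV inputs (k + 1)
          = if sV inputs k + inputs[k+1] > inputs[k+1] then tV inputs k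
            else ((k : Int) + 1) := by
        rw [tV]; simp only [List.getD_eq_getElem inputs 0 hlt]
      have hbVe : bV inputs (k + 1)
          = if sV inputs (k + 1) > (bV inputs k).1 then (sV inputs (k + 1), k + 1)
            else bV inputs k := rfl
      by_cases hc : sV inputs k + inputs[k+1] > inputs[k+1]
      · simp only [if_pos hc, hsVe, htVe, hbVe]
        by_cases hb : (if sV inputs k + inputs[k+1] > inputs[k+1]
            then sV inputs k + inputs[k+1] else inputs[k+1]) > (bV inputs k).1
        · simp only [if_pos hc] at hb ⊢
          simp only [if_pos hb, htVe, if_pos hc]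
        · simp only [if_pos hc] at hb ⊢
          simp only [if_neg hb]
      · simp only [if_neg hc, hsVe, htVe, hbVe]
        by_cases hb : (if sV inputs k + inputs[k+1] > inputs[k+1]
            then sV inputs k + inputs[k+1] else inputs[k+1]) > (bV inputs k).1
        · simp only [if_neg hc] at hb ⊢
          simp only [if_pos hb, htVe, if_neg hc]
          push_cast
          ring_nf
        · simp only [if_neg hc] at hb ⊢
          simp only [if_neg hb]
          push_cast
          ring_nf
    rw [show ((k + 1 : ℕ) : Int) + 1 = ((k + 2 : ℕ) : Int) by push_cast; ring]
    have := ih (k + 2) (by omega) (by omega)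
    rw [← this]
    congr 1

theorem bV_snd_le (inputs : List Int) (k : ℕ) : (bV inputs k).2 ≤ k := by
  induction k with
  | zero => simp [bV]
  | succ k ih =>
    rw [bV]
    split_ifs
    · simp
    · omega

theorem main_cons (x : Int) (rest : List Int) :
    contiguous_sum_6_1 (x :: rest) = contiguous_sum_6_1_alt (x :: rest) := by
  have hne : (x :: rest) ≠ [] := by simp
  unfold contiguous_sum_6_1 contiguous_sum_6_1_alt
  simp only [if_neg hne]
  have hx : sV (x :: rest) 0 = x := by rw [sV]; rfl
  have hlen : (x :: rest).length = rest.length + 1 := rfl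
  have htab0 : ((x :: rest : List Int), PySem.List.pyRange 0 (((x :: rest).length : ℕ) : Int) 1)
      = tabsAt (x :: rest) 0 := by
    unfold tabsAt
    refine Prod.ext ?_ ?_
    · simp [hx]
    · rw [PySem.List.pyRange_one_cons (by simp)]
      simp [tV]
  have htabs : List.foldl
      (fun (st : List Int × List Int) (iv : Int × Int) =>
        if (iv.1 == 0) = true then st
        else
          if PySem.List.pyGetD st.1 (iv.1 - 1) 0 + iv.2 > iv.2 then
            (PySem.List.pySetD st.1 iv.1 (PySem.List.pyGetD st.1 (iv.1 - 1) 0 + iv.2),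
              PySem.List.pySetD st.2 iv.1 (PySem.List.pyGetD st.2 (iv.1 - 1) 0))
          else st)
      ((x :: rest : List Int), PySem.List.pyRange 0 (((x :: rest).length : ℕ) : Int) 1)
      (PySem.List.enumerate (x :: rest))
      = tabsAt (x :: rest) rest.length := by
    rw [show PySem.List.enumerate (x :: rest) = (0, x) :: PySem.List.enumerate rest 1 by
      rw [PySem.List.enumerate_cons]; norm_num]
    rw [List.foldl_cons]
    have h1 := loopA (x :: rest) rest 1 (le_refl 1) (by simp) (by simp)
    rw [htab0]
    exact h1
  rw [htabs]
  have hT1 : (tabsAt (x :: rest) rest.length).1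
      = (List.range (rest.length + 1)).map (sV (x :: rest)) := by
    unfold tabsAt
    simp
  have hT2 : (tabsAt (x :: rest) rest.length).2
      = (List.range (rest.length + 1)).map (tV (x :: rest)) := by
    unfold tabsAt
    rw [PySem.List.pyRange_one_eq_nil (by simp)]
    simp
  rw [hT1, hT2]
  have hinit : PySem.List.pyGetD ((List.range (rest.length + 1)).map (sV (x :: rest))) 0 0
      = sV (x :: rest) 0 := by
    rw [PySem.List.pyGetD_zero, List.getD_eq_getElem _ _ (by simp)]
    simp
  rw [hinit]
  have hmax : List.foldl (fun (st : Int × Int) (is : Int × Int) =>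
        if is.2 > st.1 then (is.2, is.1) else st)
      (sV (x :: rest) 0, 0)
      (PySem.List.enumerate ((List.range (rest.length + 1)).map (sV (x :: rest))))
      = ((bV (x :: rest) rest.length).1, ((bV (x :: rest) rest.length).2 : Int)) := by
    have hd : (List.range (rest.length + 1)).map (sV (x :: rest))
        = sV (x :: rest) 0 :: ((List.range (rest.length + 1)).map (sV (x :: rest))).drop 1 := by
      conv_lhs => rw [show (List.range (rest.length + 1)).map (sV (x :: rest))
        = ((List.range (rest.length + 1)).map (sV (x :: rest))).drop 0 from rfl]
      rw [List.drop_eq_getElem_cons (by simp)]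
      simp
    conv_lhs => rw [hd]
    rw [show PySem.List.enumerate (sV (x :: rest) 0
          :: ((List.range (rest.length + 1)).map (sV (x :: rest))).drop 1)
        = (0, sV (x :: rest) 0)
          :: PySem.List.enumerate (((List.range (rest.length + 1)).map (sV (x :: rest))).drop 1) 1 by
      rw [PySem.List.enumerate_cons]; norm_num]
    rw [List.foldl_cons]
    rw [show (if (0, sV (x :: rest) 0).2 > (sV (x :: rest) 0, 0).1
          then ((0, sV (x :: rest) 0).2, (0, sV (x :: rest) 0).1)
          else ((sV (x :: rest) 0, 0) : Int × Int)) = (sV (x :: rest) 0, 0) from by simp]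
    have h2 := loopMax (x :: rest) (rest.length + 1) (by simp) _ 1 (le_refl 1) (by omega) rfl
    exact h2
  rw [hmax]
  have hB : List.foldl (fun (st : Int × Int × Int × Int × Int) (i : Int) =>
        let val := PySem.List.pyGetD (x :: rest) i 0
        let cur := if st.1 + val > val then st.1 + val else val
        let cur_start := if st.1 + val > val then st.2.1 else i
        if cur > st.2.2.1 then (cur, cur_start, cur, cur_start, i)
        else (cur, cur_start, st.2.2.1, st.2.2.2.1, st.2.2.2.2))
      (x, 0, x, 0, 0)
      (PySem.List.pyRange 1 (((x :: rest).length : ℕ) : Int) 1)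
      = psiAt (x :: rest) rest.length := by
    have h3 := loopB (x :: rest) rest.length 1 (le_refl 1) (by simp; omega)
    have hpsi0 : psiAt (x :: rest) 0 = (x, 0, x, 0, 0) := by
      unfold psiAt
      simp [hx, bV, tV]
    rw [hpsi0] at h3
    exact h3
  rw [hB]
  have hM : (bV (x :: rest) rest.length).2 < rest.length + 1 := by
    have := bV_snd_le (x :: rest) rest.length
    omega
  have hstart : PySem.List.pyGetD ((List.range (rest.length + 1)).map (tV (x :: rest)))
      (((bV (x :: rest) rest.length).2 : ℕ) : Int) 0
      = tV (x :: rest) (bV (x :: rest) rest.length).2 := by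
    rw [PySem.List.pyGetD_natCast, List.getD_eq_getElem _ _ (by simp; omega)]
    simp
  rw [hstart]
  rfl

-- ===== VERDICT (by name: the statement is the Claim_ definition above) =====
theorem contiguous_sum_6_1_spec : Claim_equal_contiguous_sum_6_1 := by
  intro inputs _
  unfold Spec_contiguous_sum_6_1
  match inputs with
  | [] => rfl
  | x :: rest => exact main_cons x rest
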